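-- pv_equiv track=rewrite | github.com/macaulishchina/AI-Studio | backend/api/models_api.py | _guess_tags_from_name
-- ===== SOURCE A (Python) =====
-- _KNOWN_TOOL_MODELS = {
--     # Qwen 系列 (通义千问) — qwen3 及以上全系支持 tools
--     "qwen3", "qwen2.5", "qwen2", "qwen-max", "qwen-plus", "qwen-turbo", "qwen-long",
--     "qwq",  # QwQ 推理模型也支持 tools
--     # DeepSeek
--     "deepseek-v3", "deepseek-v2", "deepseek-chat", "deepseek-coder",
--     # GLM (智谱)
--     "glm-4", "glm-3",
--     # Kimi (Moonshot)
--     "kimi", "moonshot",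
--     # MiniMax
--     "minimax",
--     # Mistral
--     "mistral-large", "mistral-medium", "mistral-small", "codestral",
--     # Meta Llama 3+
--     "llama-3", "llama-4",
--     # Cohere
--     "command-r", "command-a",
--     # xAI
--     "grok",
-- }
--
-- _KNOWN_VISION_MODELS = {
--     "qwen2.5-vl", "qwen2-vl", "qvq",
--     "glm-4v",
--     "kimi-vision",
-- }
--
-- def _guess_tags_from_name(model_name: str) -> list:
--     """根据模型名称猜测能力 tags"""
--     n = model_name.lower()
--     tags = []
--     # 多模态 (视觉)
--     if any(k in n for k in ("vl", "vision", "multimodal", "omni")):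
--         tags.append("multimodal")
--     elif any(n.startswith(p) for p in _KNOWN_VISION_MODELS):
--         tags.append("multimodal")
--     # 推理
--     if any(k in n for k in ("think", "r1", "qwq", "qvq")):
--         tags.append("reasoning")
--     # 工具调用: 名称关键词 + 已知模型族
--     if any(k in n for k in ("tool", "agent", "function")):
--         tags.append("agents")
--     elif any(n.startswith(p) or n == p for p in _KNOWN_TOOL_MODELS):
--         tags.append("agents")
--     # 编码增强
--     if any(k in n for k in ("coder", "codestral", "codeqwen")):
--         tags.append("coding")
--     return tags
-- ===== SOURCE B (Python) =====
-- _TAGS = ("multimodal", "reasoning", "agents", "coding")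
--
-- # One flat pattern list: (pattern, is_prefix, tag_bit).  A single pass over it
-- # accumulates a 4-bit capability mask, which is then decoded into tag names.
-- # The redundant exact-equality clause of the original is dropped: string equality implies startswith.
-- _PATTERNS = (
--     [(k, False, 0) for k in ("vl", "vision", "multimodal", "omni")]
--     + [(p, True, 0) for p in ("qwen2.5-vl", "qwen2-vl", "qvq", "glm-4v", "kimi-vision")]
--     + [(k, False, 1) for k in ("think", "r1", "qwq", "qvq")]
--     + [(k, False, 2) for k in ("tool", "agent", "function")]
--     + [(p, True, 2) for p in (
--         "qwen3", "qwen2.5", "qwen2", "qwen-max", "qwen-plus", "qwen-turbo", "qwen-long",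
--         "qwq",
--         "deepseek-v3", "deepseek-v2", "deepseek-chat", "deepseek-coder",
--         "glm-4", "glm-3",
--         "kimi", "moonshot",
--         "minimax",
--         "mistral-large", "mistral-medium", "mistral-small", "codestral",
--         "llama-3", "llama-4",
--         "command-r", "command-a",
--         "grok")]
--     + [(k, False, 3) for k in ("coder", "codestral", "codeqwen")]
-- )
--
--
-- def _guess_tags_from_name(model_name: str) -> list:
--     n = model_name.lower()
--     mask = 0
--     for pat, is_prefix, bit in _PATTERNS:
--         if n.startswith(pat) if is_prefix else pat in n:
--             mask |= 1 << bit
--     return [tag for i, tag in enumerate(_TAGS) if mask >> i & 1]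
-- ===== Notes on version B (the rewrite author's own statement) =====
-- stated objective: alternative
-- what changed: Replaces the four hand-written if/elif append blocks by one flat pass over a pattern list (pattern, is_prefix, tag_bit) that accumulates a 4-bit capability bitmask, then decodes the mask into tag names; the redundant exact-equality clause is dropped since string equality implies startswith.
import Mathlib
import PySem

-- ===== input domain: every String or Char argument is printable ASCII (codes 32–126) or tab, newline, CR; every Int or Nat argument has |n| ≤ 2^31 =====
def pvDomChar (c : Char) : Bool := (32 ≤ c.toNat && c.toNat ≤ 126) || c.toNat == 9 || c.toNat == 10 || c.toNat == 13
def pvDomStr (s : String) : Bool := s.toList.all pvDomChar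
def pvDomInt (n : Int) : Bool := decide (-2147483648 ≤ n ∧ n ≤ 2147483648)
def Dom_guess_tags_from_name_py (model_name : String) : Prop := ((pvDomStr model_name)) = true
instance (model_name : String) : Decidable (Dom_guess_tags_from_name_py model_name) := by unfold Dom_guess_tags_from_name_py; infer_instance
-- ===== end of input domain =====

-- B replaces A's if/elif chain by one flat pass over a pattern list accumulating a
-- bitmask, then decodes the mask into tag names (alternative decomposition; same cost).

-- ===== PORT A =====
-- Python sets of known model names (only membership scans via `any` are used)
def pvKnownToolModels : List String :=
  ["qwen3", "qwen2.5", "qwen2", "qwen-max", "qwen-plus", "qwen-turbo", "qwen-long",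
   "qwq",
   "deepseek-v3", "deepseek-v2", "deepseek-chat", "deepseek-coder",
   "glm-4", "glm-3",
   "kimi", "moonshot",
   "minimax",
   "mistral-large", "mistral-medium", "mistral-small", "codestral",
   "llama-3", "llama-4",
   "command-r", "command-a",
   "grok"]

def pvKnownVisionModels : List String :=
  ["qwen2.5-vl", "qwen2-vl", "qvq", "glm-4v", "kimi-vision"]

def guess_tags_from_name_py (model_name : String) : List String :=
  let n := PySem.Str.lower model_name
  let tags : List String := []
  let tags :=
    if (["vl", "vision", "multimodal", "omni"] : List String).any (fun k => PySem.Str.isIn k n) then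
      tags ++ ["multimodal"]
    else if pvKnownVisionModels.any (fun p => PySem.Str.startswith n p) then
      tags ++ ["multimodal"]
    else tags
  let tags :=
    if (["think", "r1", "qwq", "qvq"] : List String).any (fun k => PySem.Str.isIn k n) then
      tags ++ ["reasoning"]
    else tags
  let tags :=
    if (["tool", "agent", "function"] : List String).any (fun k => PySem.Str.isIn k n) then
      tags ++ ["agents"]
    else if pvKnownToolModels.any (fun p => PySem.Str.startswith n p || n == p) then
      tags ++ ["agents"]
    else tags
  let tags :=
    if (["coder", "codestral", "codeqwen"] : List String).any (fun k => PySem.Str.isIn k n) then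
      tags ++ ["coding"]
    else tags
  tags

-- ===== PORT B =====
def pvTags : List String := ["multimodal", "reasoning", "agents", "coding"]

-- the flat pattern list of Source B: (pattern, is_prefix, tag_bit), built group by group
def pvPatterns : List (String × Bool × Nat) :=
  (["vl", "vision", "multimodal", "omni"].map (fun k => (k, false, 0)))
  ++ (["qwen2.5-vl", "qwen2-vl", "qvq", "glm-4v", "kimi-vision"].map (fun p => (p, true, 0)))
  ++ (["think", "r1", "qwq", "qvq"].map (fun k => (k, false, 1)))
  ++ (["tool", "agent", "function"].map (fun k => (k, false, 2)))
  ++ (["qwen3", "qwen2.5", "qwen2", "qwen-max", "qwen-plus", "qwen-turbo", "qwen-long",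
       "qwq",
       "deepseek-v3", "deepseek-v2", "deepseek-chat", "deepseek-coder",
       "glm-4", "glm-3",
       "kimi", "moonshot",
       "minimax",
       "mistral-large", "mistral-medium", "mistral-small", "codestral",
       "llama-3", "llama-4",
       "command-r", "command-a",
       "grok"].map (fun p => (p, true, 2)))
  ++ (["coder", "codestral", "codeqwen"].map (fun k => (k, false, 3)))

-- `n.startswith(pat) if is_prefix else pat in n`
def pvMatch (n : String) (p : String × Bool × Nat) : Bool :=
  if p.2.1 then PySem.Str.startswith n p.1 else PySem.Str.isIn p.1 n

def pvMaskStep (n : String) (m : Nat) (p : String × Bool × Nat) : Nat :=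
  if pvMatch n p then m ||| (1 <<< p.2.2) else m

def guess_tags_from_name_py_alt (model_name : String) : List String :=
  let n := PySem.Str.lower model_name
  let mask := pvPatterns.foldl (pvMaskStep n) 0
  ((PySem.List.enumerate pvTags).filter (fun it => (mask >>> it.1.toNat) &&& 1 == 1)).map
    (fun it => it.2)

-- ===== PRECONDITION & SPEC =====
def Spec_guess_tags_from_name_py (model_name : String) (out : List String) : Prop := out = guess_tags_from_name_py_alt model_name
instance (model_name : String) (out : List String) : Decidable (Spec_guess_tags_from_name_py model_name out) := by unfold Spec_guess_tags_from_name_py; infer_instance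

-- ===== CLAIM (what is proved, stated in full; the proofs are below) =====
def Claim_equal_guess_tags_from_name_py : Prop := ∀ (model_name : String), Dom_guess_tags_from_name_py model_name → Spec_guess_tags_from_name_py model_name (guess_tags_from_name_py model_name)

-- ===== LEMMAS AND PROOFS =====

-- folding the mask step over a group whose patterns all carry bit b sets that bit iff some pattern matches
theorem pv_fold_group (n : String) (b : Nat) (L : List (String × Bool × Nat))
    (hb : ∀ p ∈ L, p.2.2 = b) (m : Nat) :
    L.foldl (pvMaskStep n) m = if L.any (pvMatch n) then m ||| (1 <<< b) else m := by
  induction L generalizing m with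
  | nil => simp
  | cons p L ih =>
    have hpb : p.2.2 = b := hb p (List.mem_cons_self ..)
    have hrest : ∀ q ∈ L, q.2.2 = b := fun q hq => hb q (List.mem_cons_of_mem _ hq)
    simp only [List.foldl_cons, List.any_cons, pvMaskStep, hpb]
    by_cases h : pvMatch n p = true
    · simp only [h, if_true, Bool.true_or, ih hrest]
      split
      · rw [Nat.or_assoc, Nat.or_self]
      · rfl
    · rw [Bool.not_eq_true] at h
      simp only [ih hrest, h, Bool.false_eq_true, if_false, Bool.false_or]

-- if/elif appending the same element collapses to a single OR
theorem pv_if_elif_append (c1 c2 : Bool) (t : List String) (x : String) :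
    (if c1 then t ++ [x] else if c2 then t ++ [x] else t) = (if (c1 || c2) then t ++ [x] else t) := by
  cases c1 <;> simp

-- `n == p` is redundant next to `n.startswith(p)`
theorem pv_startswith_or_beq (n p : String) :
    (PySem.Str.startswith n p || (n == p)) = PySem.Str.startswith n p := by
  cases h : (n == p)
  · simp
  · have : n = p := by exact_mod_cast (beq_iff_eq).mp h
    subst this
    simp [PySem.Chars.startswith_iff]

-- ===== VERDICT (by name: the statement is the Claim_ definition above) =====
theorem guess_tags_from_name_py_spec : Claim_equal_guess_tags_from_name_py := by
  intro model_name _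
  unfold Spec_guess_tags_from_name_py guess_tags_from_name_py guess_tags_from_name_py_alt
  unfold pvPatterns pvKnownVisionModels pvKnownToolModels
  generalize PySem.Str.lower model_name = n
  dsimp only
  rw [List.foldl_append, List.foldl_append, List.foldl_append, List.foldl_append,
      List.foldl_append]
  rw [pv_fold_group n 3 _ (by decide), pv_fold_group n 2 _ (by decide),
      pv_fold_group n 2 _ (by decide), pv_fold_group n 1 _ (by decide),
      pv_fold_group n 0 _ (by decide), pv_fold_group n 0 _ (by decide)]
  simp only [pv_startswith_or_beq, pv_if_elif_append, List.any_map, Function.comp_def, pvMatch,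
    Bool.false_eq_true, if_false, if_true]
  generalize (["vl", "vision", "multimodal", "omni"] : List String).any (fun k => PySem.Str.isIn k n) = c1
  generalize (["qwen2.5-vl", "qwen2-vl", "qvq", "glm-4v", "kimi-vision"] : List String).any (fun p => PySem.Str.startswith n p) = c2
  generalize (["think", "r1", "qwq", "qvq"] : List String).any (fun k => PySem.Str.isIn k n) = c3
  generalize (["tool", "agent", "function"] : List String).any (fun k => PySem.Str.isIn k n) = c4
  generalize (["qwen3", "qwen2.5", "qwen2", "qwen-max", "qwen-plus", "qwen-turbo", "qwen-long",
       "qwq",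
       "deepseek-v3", "deepseek-v2", "deepseek-chat", "deepseek-coder",
       "glm-4", "glm-3",
       "kimi", "moonshot",
       "minimax",
       "mistral-large", "mistral-medium", "mistral-small", "codestral",
       "llama-3", "llama-4",
       "command-r", "command-a",
       "grok"] : List String).any (fun p => PySem.Str.startswith n p) = c5
  generalize (["coder", "codestral", "codeqwen"] : List String).any (fun k => PySem.Str.isIn k n) = c6
  cases c1 <;> cases c2 <;> cases c3 <;> cases c4 <;> cases c5 <;> cases c6 <;> rfl
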